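-- pv_equiv track=rewrite | github.com/hyunjink1994/algorithm | pythonProject/Problem/BaekJoon/15685/15685.py | checkSqr
-- ===== SOURCE A (Python) =====
-- def checkSqr(canvas):
--     count = 0
--     for i in range(len(canvas) - 1):
--         for j in range(len(canvas) - 1):
--             if (canvas[i][j] == 1 and
--                     canvas[i + 1][j] == 1 and
--                     canvas[i][j + 1] == 1 and
--                     canvas[i + 1][j + 1] == 1):
--                 count += 1
--     return count
-- ===== SOURCE B (Python) =====
-- def checkSqr(canvas):
--     n = len(canvas)
--     # Phase 1: per row, the set of columns starting a horizontal 1-1 pair.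
--     pairs = [{j for j in range(n - 1) if canvas[i][j] == 1 and canvas[i][j + 1] == 1}
--              for i in range(n)]
--     # Phase 2: a 2x2 square at (i, j) is a pair-column j shared by rows i and i+1.
--     total = 0
--     for i in range(n - 1):
--         total += len(pairs[i] & pairs[i + 1])
--     return total
-- ===== Notes on version B (the rewrite author's own statement) =====
-- stated objective: alternative
-- what changed: Replaces the direct 2x2 window scan by a two-phase algorithm: first build, per row, the set of columns where a horizontal 1-1 pair starts, then sum the sizes of the intersections of adjacent rows' sets; each row's horizontal pairs are computed once instead of being re-tested for both windows that touch the row.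
-- outside the precondition, e.g. on checkSqr([[1], [0, 0]]): A returns 0, B raises IndexError; on checkSqr([[1, 1], [1]]): A raises IndexError, B raises IndexError
import Mathlib
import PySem

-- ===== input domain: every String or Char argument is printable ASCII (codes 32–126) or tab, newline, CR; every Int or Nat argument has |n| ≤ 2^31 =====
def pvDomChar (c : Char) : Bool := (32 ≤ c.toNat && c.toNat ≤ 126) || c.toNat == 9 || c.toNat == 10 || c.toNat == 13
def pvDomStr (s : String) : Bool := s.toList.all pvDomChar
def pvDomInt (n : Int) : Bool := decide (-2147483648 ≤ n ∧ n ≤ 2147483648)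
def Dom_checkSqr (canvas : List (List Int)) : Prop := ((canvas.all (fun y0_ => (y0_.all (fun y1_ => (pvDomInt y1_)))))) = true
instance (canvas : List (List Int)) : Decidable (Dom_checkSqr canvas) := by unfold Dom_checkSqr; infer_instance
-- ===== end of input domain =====

-- B counts 2x2 squares by intersecting per-row horizontal-pair column sets instead of A's
-- direct 2x2 window scan (objective: alternative decomposition, same asymptotic cost).
-- Equality is proved on Pre_ (grids whose rows all have length ≥ len(canvas)).

-- ===== PORT A =====
-- canvas[i][j]; exact under Pre_, where every index A evaluates is in range.
def pvCellA (canvas : List (List Int)) (i j : Int) : Int :=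
  PySem.List.pyGetD (PySem.List.pyGetD canvas i []) j 0

def checkSqr (canvas : List (List Int)) : Int :=
  (PySem.List.pyRange 0 ((canvas.length : Int) - 1) 1).foldl (fun count i =>
    (PySem.List.pyRange 0 ((canvas.length : Int) - 1) 1).foldl (fun count j =>
      if pvCellA canvas i j == 1 && pvCellA canvas (i + 1) j == 1 &&
         pvCellA canvas i (j + 1) == 1 && pvCellA canvas (i + 1) (j + 1) == 1
      then count + 1 else count) count) 0

-- ===== PORT B =====
-- canvas[i][j]; exact under Pre_, where every index B evaluates is in range.
def pvCellB (canvas : List (List Int)) (i j : Int) : Int :=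
  PySem.List.pyGetD (PySem.List.pyGetD canvas i []) j 0

-- {j for j in range(n-1) if canvas[i][j] == 1 and canvas[i][j+1] == 1}
def pvRowPairs (canvas : List (List Int)) (i : Int) : PySem.Set Int :=
  PySem.Set.ofList ((PySem.List.pyRange 0 ((canvas.length : Int) - 1) 1).filter
    (fun j => pvCellB canvas i j == 1 && pvCellB canvas i (j + 1) == 1))

def checkSqr_alt (canvas : List (List Int)) : Int :=
  let pairs := (PySem.List.pyRange 0 (canvas.length : Int) 1).map (fun i => pvRowPairs canvas i)
  (PySem.List.pyRange 0 ((canvas.length : Int) - 1) 1).foldl (fun total i =>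
    total + PySem.Set.len (PySem.Set.inter
      (PySem.List.pyGetD pairs i PySem.Set.empty)
      (PySem.List.pyGetD pairs (i + 1) PySem.Set.empty))) 0

-- ===== PRECONDITION & SPEC =====
-- Pre_ excludes ragged grids (some row shorter than len(canvas), when len(canvas) ≥ 2): there
-- whether a program returns or raises IndexError depends on its short-circuit evaluation order,
-- so A may return 0 where B raises (and both raise on others); on grids satisfying Pre_ every
-- index either program touches is in range and both always return.
def Pre_checkSqr (canvas : List (List Int)) : Prop :=
  canvas.length ≤ 1 ∨ ∀ row ∈ canvas, canvas.length ≤ row.length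
instance (canvas : List (List Int)) : Decidable (Pre_checkSqr canvas) := by
  unfold Pre_checkSqr; infer_instance

def pvWitness_checkSqr : List (List Int) := [[1, 1, 0], [1, 1, 1], [0, 1, 1]]

def Spec_checkSqr (canvas : List (List Int)) (out : Int) : Prop := out = checkSqr_alt canvas
instance (canvas : List (List Int)) (out : Int) : Decidable (Spec_checkSqr canvas out) := by
  unfold Spec_checkSqr; infer_instance

-- ===== CLAIM (what is proved, stated in full; the proofs are below) =====
def Claim_equal_checkSqr : Prop := ∀ (canvas : List (List Int)),
  Dom_checkSqr canvas → Pre_checkSqr canvas → Spec_checkSqr canvas (checkSqr canvas)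

-- ===== LEMMAS AND PROOFS =====

-- The two ports read cells identically.
theorem pvCell_eq (canvas : List (List Int)) : pvCellA canvas = pvCellB canvas := rfl

-- A foldl whose step is "accumulator + term" sums the terms (shape of A's outer loop after
-- the inner loop is rewritten to a count).
theorem pv_foldl_add_shape (l : List Int) (t : Int → Int) (f : Int → Int → Int)
    (h : ∀ c x, f c x = c + t x) (a : Int) :
    l.foldl f a = a + (l.map t).sum := by
  induction l generalizing a with
  | nil => simp
  | cons x xs ih => simp [h, ih, add_assoc]

-- B's per-i term is a countP over the same range with A's predicate.
theorem pv_term_eq (canvas : List (List Int)) (i : Int) :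
    PySem.Set.len (PySem.Set.inter (pvRowPairs canvas i) (pvRowPairs canvas (i + 1)))
    = ((PySem.List.pyRange 0 ((canvas.length : Int) - 1) 1).countP (fun j =>
        pvCellA canvas i j == 1 && pvCellA canvas (i + 1) j == 1 &&
        pvCellA canvas i (j + 1) == 1 && pvCellA canvas (i + 1) (j + 1) == 1) : Int) := by
  unfold pvRowPairs
  rw [PySem.Set.ofList_eq_self_of_nodup _
        ((PySem.List.nodup_pyRange_one _ _).filter _),
      PySem.Set.ofList_eq_self_of_nodup _
        ((PySem.List.nodup_pyRange_one _ _).filter _)]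
  unfold PySem.Set.inter PySem.Set.len
  rw [List.filter_filter, ← List.countP_eq_length_filter]
  congr 1
  apply List.countP_congr
  intro j hj
  rw [Bool.eq_iff_iff]
  simp only [Bool.and_eq_true, PySem.Set.contains, List.contains_iff_mem,
    List.mem_filter, PySem.List.mem_pyRange_one, pvCell_eq]
  rw [PySem.List.mem_pyRange_one] at hj
  tauto

-- ===== VERDICT (by name: the statement is the Claim_ definition above) =====
theorem checkSqr_spec : Claim_equal_checkSqr := by
  intro canvas _ _
  unfold Spec_checkSqr checkSqr checkSqr_alt
  -- rewrite A's inner loop into a count, then both outer loops into sums of the same terms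
  rw [pv_foldl_add_shape _ (fun i =>
        ((PySem.List.pyRange 0 ((canvas.length : Int) - 1) 1).countP (fun j =>
          pvCellA canvas i j == 1 && pvCellA canvas (i + 1) j == 1 &&
          pvCellA canvas i (j + 1) == 1 && pvCellA canvas (i + 1) (j + 1) == 1) : Int)) _
        (fun c i => PySem.List.foldl_if_add_one _ _ c) 0]
  rw [PySem.List.foldl_congr_mem _ _
        (fun total i => total + PySem.Set.len (PySem.Set.inter
          (pvRowPairs canvas i) (pvRowPairs canvas (i + 1)))) 0 ?hcong]
  case hcong =>
    intro acc i hi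
    rw [PySem.List.mem_pyRange_one] at hi
    rw [PySem.List.pyGetD_map_pyRange_of_nonneg (fun k => pvRowPairs canvas k)
          (canvas.length : Int) i PySem.Set.empty hi.1 (by omega),
        PySem.List.pyGetD_map_pyRange_of_nonneg (fun k => pvRowPairs canvas k)
          (canvas.length : Int) (i + 1) PySem.Set.empty (by omega) (by omega)]
  rw [pv_foldl_add_shape _ (fun i =>
        PySem.Set.len (PySem.Set.inter (pvRowPairs canvas i) (pvRowPairs canvas (i + 1))))
        _ (fun c i => rfl) 0]
  have hmap := List.map_congr_left
      (l := PySem.List.pyRange 0 ((canvas.length : Int) - 1) 1)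
      (fun i _ => (pv_term_eq canvas i).symm)
  rw [hmap]
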